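-- pv_equiv track=rewrite | github.com/li-trot/exam | text_from_matrix_ex/text_from_matrix.py | text_from_matrix
-- ===== SOURCE A (Python) =====
-- def text_from_matrix(two_d_matrix):
--     """The method creates the text from the letters found in the matrix.
--     Argument: two_d_matrix - 2D array matrix containing letters.
--     Returns: text.
--     Which letters to select:
--     From every even row, select the letter found in the even columns
--     From every odd row, select the letter found in the odd columns.
--     The letters will be concatenated in this order: from left-top to right-bottom.
-- """
--
--     text = ""
--     if not all(len(row) == len(two_d_matrix[0]) for row in two_d_matrix):
--         raise AttributeError(
--             "Input should be a 2D matrix with equal number of columns in each row.")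
--     for num, row in enumerate(two_d_matrix):
--         for letter in row:
--             if not letter.isalpha():
--                 raise AttributeError(
--                     "Input should be a 2D matrix that contains letters only.")
--         if num % 2 == 0:
--             letters = row[::2]
--         else:
--             letters = row[1::2]
--         text += "".join(letters)
--     return text
-- ===== SOURCE B (Python) =====
-- def text_from_matrix(two_d_matrix):
--     """Simpler: validate, then one flat pass selecting cells where (row+col) is even."""
--     if not all(len(row) == len(two_d_matrix[0]) for row in two_d_matrix):
--         raise AttributeError(
--             "Input should be a 2D matrix with equal number of columns in each row.")
--     for row in two_d_matrix:
--         for letter in row: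
--             if not letter.isalpha():
--                 raise AttributeError(
--                     "Input should be a 2D matrix that contains letters only.")
--     return "".join(c for i, row in enumerate(two_d_matrix)
--                      for j, c in enumerate(row) if (i + j) % 2 == 0)
-- ===== Notes on version B (the rewrite author's own statement) =====
-- stated objective: simpler
-- what changed: Replaces the per-row parity slicing (row[::2]/row[1::2]) and the incremental string concatenation with a separate validation pass followed by one flat generator join that selects exactly the cells where (row+col) is even.
import Mathlib
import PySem

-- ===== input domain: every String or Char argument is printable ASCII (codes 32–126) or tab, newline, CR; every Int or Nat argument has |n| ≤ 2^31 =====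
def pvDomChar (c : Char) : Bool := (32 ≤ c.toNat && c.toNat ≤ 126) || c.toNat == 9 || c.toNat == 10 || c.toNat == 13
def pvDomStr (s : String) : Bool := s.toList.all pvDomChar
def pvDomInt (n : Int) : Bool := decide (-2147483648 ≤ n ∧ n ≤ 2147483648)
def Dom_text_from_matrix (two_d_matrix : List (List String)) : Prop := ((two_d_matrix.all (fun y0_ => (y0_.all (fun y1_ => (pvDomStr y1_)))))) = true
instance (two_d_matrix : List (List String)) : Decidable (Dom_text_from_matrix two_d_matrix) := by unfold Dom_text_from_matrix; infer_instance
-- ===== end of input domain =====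

-- B replaces A's per-row parity slicing and string accumulation with one flat (row+col)-parity
-- selection joined once; objective: simpler, same cost. Return-value equivalence on Pre_ (A's
-- AttributeError inputs excluded).


-- ===== PORT A =====
-- A's two raise paths are excluded by Pre_; the enumerate loop, the per-row parity slice
-- (row[::2] / row[1::2]) and the string accumulation are transliterated.
def text_from_matrix (two_d_matrix : List (List String)) : String :=
  (PySem.List.enumerate two_d_matrix).foldl
    (fun text p =>
      let letters : List String :=
        if PySem.Int.mod p.1 2 = 0 then (PySem.List.slice? p.2 none none 2).getD []
        else (PySem.List.slice? p.2 (some 1) none 2).getD []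
      text ++ PySem.Str.join "" letters) ""

-- ===== PORT B =====
-- Source B's single flat generator join: cells (i, j) with (i + j) % 2 == 0, row-major.
def text_from_matrix_alt (two_d_matrix : List (List String)) : String :=
  PySem.Str.join ""
    ((PySem.List.enumerate two_d_matrix).flatMap (fun p =>
      (PySem.List.enumerate p.2).filterMap (fun q =>
        if PySem.Int.mod (p.1 + q.1) 2 = 0 then some q.2 else none)))

-- ===== PRECONDITION & SPEC =====
-- Pre_ excludes exactly the inputs on which A raises AttributeError: a row whose length differs
-- from the first row's, or a cell that is not a nonempty all-letters string.
def Pre_text_from_matrix (two_d_matrix : List (List String)) : Prop :=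
  (∀ row ∈ two_d_matrix, row.length = (two_d_matrix.headD []).length) ∧
  (∀ row ∈ two_d_matrix, ∀ c ∈ row, PySem.Str.strIsalpha c = true)
instance (two_d_matrix : List (List String)) : Decidable (Pre_text_from_matrix two_d_matrix) := by unfold Pre_text_from_matrix; infer_instance
def pvWitness_text_from_matrix : List (List String) := [["a", "b"], ["c", "d"]]

def Spec_text_from_matrix (two_d_matrix : List (List String)) (out : String) : Prop := out = text_from_matrix_alt two_d_matrix
instance (two_d_matrix : List (List String)) (out : String) : Decidable (Spec_text_from_matrix two_d_matrix out) := by unfold Spec_text_from_matrix; infer_instance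

-- ===== CLAIM (what is proved, stated in full; the proofs are below) =====
def Claim_equal_text_from_matrix : Prop := ∀ (two_d_matrix : List (List String)), Dom_text_from_matrix two_d_matrix → Pre_text_from_matrix two_d_matrix → Spec_text_from_matrix two_d_matrix (text_from_matrix two_d_matrix)

-- ===== LEMMAS AND PROOFS =====

/-- Every other element starting with the first: what `row[::2]` selects. -/
def pvEvens {α : Type} : List α → List α
  | [] => []
  | [x] => [x]
  | x :: _ :: xs => x :: pvEvens xs

theorem pvEvens_cons {α : Type} (y : α) (xs : List α) :
    pvEvens (y :: xs) = y :: pvEvens xs.tail := by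
  cases xs <;> simp [pvEvens]

theorem filtN {α : Type} (row : List α) :
    (List.range ((row.length + 1) / 2)).filterMap (fun k => row[2 * k]?) = pvEvens row := by
  induction row using pvEvens.induct with
  | case1 => simp [pvEvens]
  | case2 x => simp [pvEvens, List.range_succ]
  | case3 x y xs ih =>
      have hc : (((x :: y :: xs).length + 1) / 2) = (xs.length + 1) / 2 + 1 := by
        simp; omega
      rw [hc, List.range_succ_eq_map, List.filterMap_cons, List.filterMap_map]
      have hf : ((fun k => (x :: y :: xs)[2 * k]?) ∘ Nat.succ) = fun k : Nat => xs[2 * k]? := by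
        funext k
        show (x :: y :: xs)[2 * (k + 1)]? = xs[2 * k]?
        have h2 : 2 * (k + 1) = (2 * k) + 1 + 1 := by omega
        rw [h2]; simp
      simp only [Nat.mul_zero, List.getElem?_cons_zero, hf, ih]
      simp [pvEvens]

theorem slice2_evens {α : Type} (row : List α) :
    (PySem.List.slice? row none none 2).getD [] = pvEvens row := by
  simp only [PySem.List.slice?, PySem.List.sliceIndices]
  norm_num
  have hc : (if 0 < row.length then (((row.length : Int) + 2 - 1) / 2).toNat else 0)
      = (row.length + 1) / 2 := by split <;> omega
  have hf : (fun k : Nat => row[(2 * (k : Int)).toNat]?) = fun k : Nat => row[2 * k]? := by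
    funext k
    have h2 : (2 * (k : Int)).toNat = 2 * k := by omega
    rw [h2]
  rw [hc, hf, filtN]

theorem slice2_odds {α : Type} (row : List α) :
    (PySem.List.slice? row (some 1) none 2).getD [] = pvEvens row.tail := by
  simp only [PySem.List.slice?, PySem.List.sliceIndices]
  norm_num
  have ht : row.tail.length = row.length - 1 := by rcases row <;> simp
  have hc : (if 1 < row.length then (((row.length : Int) - min 1 (row.length : Int) + 2 - 1) / 2).toNat else 0)
      = (row.tail.length + 1) / 2 := by
    rw [ht]; split <;> omega
  have hf : (fun k : Nat => row[(min 1 (row.length : Int) + 2 * (k : Int)).toNat]?)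
      = fun k : Nat => row.tail[2 * k]? := by
    funext k
    rcases row with _ | ⟨x, xs⟩
    · simp
    · have h2 : (min 1 (((x :: xs).length : Nat) : Int) + 2 * (k : Int)).toNat = 2 * k + 1 := by
        simp only [List.length_cons]; omega
      rw [h2]
      simp [List.getElem?_cons_succ]
  rw [hc, hf, filtN]

theorem filt_parity (i : Int) (row : List String) : ∀ j : Int,
    (PySem.List.enumerate row j).filterMap (fun q =>
        if PySem.Int.mod (i + q.1) 2 = 0 then some q.2 else none)
      = if PySem.Int.mod (i + j) 2 = 0 then pvEvens row else pvEvens row.tail := by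
  induction row using pvEvens.induct with
  | case1 =>
      intro j
      simp only [PySem.List.enumerate_nil, List.filterMap_nil, List.tail_nil]
      split <;> rfl
  | case2 x =>
      intro j
      by_cases h : (2 : Int) ∣ (i + j) <;>
        simp [h, pvEvens, PySem.List.enumerate_cons, PySem.List.enumerate_nil]
  | case3 x y xs ih =>
      intro j
      simp only [PySem.Int.mod_eq_zero_iff_dvd] at ih ⊢
      simp only [PySem.List.enumerate_cons, List.filterMap_cons]
      by_cases h : (2 : Int) ∣ (i + j)
      · have h1 : ¬ (2 : Int) ∣ (i + (j + 1)) := by omega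
        have h2 : (2 : Int) ∣ (i + (j + 1 + 1)) := by omega
        simp [h, h1, h2, ih, pvEvens]
      · have h1 : (2 : Int) ∣ (i + (j + 1)) := by omega
        have h2 : ¬ (2 : Int) ∣ (i + (j + 1 + 1)) := by omega
        simp [h, h1, h2, ih, pvEvens_cons]

theorem chars_join_nil (l : List (List Char)) : PySem.Chars.join [] l = l.flatten := by
  induction l with
  | nil => simp [PySem.Chars.join_nil]
  | cons a l ih =>
      cases l with
      | nil => simp [PySem.Chars.join_singleton]
      | cons b r => rw [PySem.Chars.join_cons_cons]; simp_all

theorem join_empty_append (a b : List String) :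
    PySem.Str.join "" (a ++ b) = PySem.Str.join "" a ++ PySem.Str.join "" b := by
  simp only [PySem.Str.join, List.map_append, String.toList_empty, chars_join_nil,
    List.flatten_append]
  exact String.ofList_append

theorem loop_eq (m : List (List String)) : ∀ (s : Int) (acc : String),
    (PySem.List.enumerate m s).foldl
      (fun text p =>
        let letters : List String :=
          if PySem.Int.mod p.1 2 = 0 then (PySem.List.slice? p.2 none none 2).getD []
          else (PySem.List.slice? p.2 (some 1) none 2).getD []
        text ++ PySem.Str.join "" letters) acc
    = acc ++ PySem.Str.join ""
        ((PySem.List.enumerate m s).flatMap (fun p =>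
          (PySem.List.enumerate p.2).filterMap (fun q =>
            if PySem.Int.mod (p.1 + q.1) 2 = 0 then some q.2 else none))) := by
  induction m with
  | nil =>
      intro s acc
      simp [PySem.List.enumerate_nil, PySem.Str.join, PySem.Chars.join_nil]
  | cons r m ih =>
      intro s acc
      have hrow : (PySem.List.enumerate r 0).filterMap (fun q =>
          if PySem.Int.mod (s + q.1) 2 = 0 then some q.2 else none)
          = if PySem.Int.mod s 2 = 0 then pvEvens r else pvEvens r.tail := by
        have := filt_parity s r 0
        simpa using this
      simp only [PySem.List.enumerate_cons, List.foldl_cons, List.flatMap_cons]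
      rw [ih, join_empty_append, hrow, ← String.append_assoc]
      congr 1
      congr 1
      split <;> [rw [slice2_evens]; rw [slice2_odds]]

-- ===== VERDICT (by name: the statement is the Claim_ definition above) =====
theorem text_from_matrix_spec : Claim_equal_text_from_matrix := by
  intro m _ _
  unfold Spec_text_from_matrix text_from_matrix text_from_matrix_alt
  rw [loop_eq]
  simp
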